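-- pv_equiv track=rewrite | github.com/dertbv/bobblemail | legitimate_business_prefixes.py | _is_professional_name_pattern
-- ===== SOURCE A (Python) =====
-- def _is_professional_name_pattern(local_part):
--     """Check for professional name patterns like firstname.lastname"""
--
--     # Common professional patterns
--     professional_patterns = [
--         # First.Last format
--         len(local_part.split('.')) == 2 and all(len(part) >= 2 for part in local_part.split('.')),
--
--         # Professional role indicators
--         any(role in local_part for role in ['ceo', 'cfo', 'cto', 'vp', 'president', 'director']),
--
--         # Department + name patterns
--         any(dept in local_part for dept in ['marketing', 'sales', 'support']
--             if '.' in local_part or '_' in local_part),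
--
--         # Company name as prefix (common for major retailers)
--         _is_likely_company_name_prefix(local_part),
--     ]
--
--     return any(professional_patterns)
--
-- def _is_likely_company_name_prefix(local_part):
--     """Check if local part looks like a company name used as email prefix"""
--
--     # Known legitimate company name patterns used as email prefixes
--     known_company_patterns = {
--         # Major retailers that use company name as prefix
--         'kohls', 'kohl', 'macys', 'macy', 'nordstrom', 'target', 'walmart',
--         'amazon', 'costco', 'sears', 'jcpenney', 'bloomingdales',
--
--         # Fashion/apparel brands
--         'loft', 'nike', 'adidas', 'gap', 'oldnavy', 'banana', 'republic',
--         'forever21', 'hm', 'zara', 'uniqlo', 'express', 'victoriassecret',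
--
--         # Department stores and specialty retailers
--         'bestbuy', 'homedepot', 'lowes', 'staples', 'officemax', 'officedepot',
--         'walgreens', 'cvs', 'rite', 'aid', 'petco', 'petsmart',
--
--         # Food and restaurants
--         'starbucks', 'mcdonalds', 'subway', 'dominos', 'pizzahut', 'kfc',
--         'tacobell', 'wendys', 'chipotle', 'panera',
--
--         # Technology and services
--         'apple', 'microsoft', 'google', 'facebook', 'twitter', 'linkedin',
--         'netflix', 'spotify', 'uber', 'lyft', 'airbnb',
--
--         # Financial and travel
--         'chase', 'wellsfargo', 'bankofamerica', 'citi', 'amex', 'discover',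
--         'expedia', 'priceline', 'kayak', 'booking', 'hotels',
--
--         # News and media
--         'cnn', 'bbc', 'reuters', 'nytimes', 'washingtonpost', 'wsj',
--         'bloomberg', 'forbes', 'time', 'newsweek',
--
--         # Other legitimate organizations
--         'consumerreports', 'consumer', 'reports', 'yelp', 'groupon',
--         'nextdoor', 'zillow', 'realtor', 'redfin'
--     }
--
--     # Direct match
--     if local_part in known_company_patterns:
--         return True
--
--     # Check for company name variations (with underscores, etc.)
--     normalized = local_part.replace('_', '').replace('-', '')
--     if normalized in known_company_patterns:
--         return True
--
--     # Check for partial matches (company name + descriptive suffix)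
--     for company in known_company_patterns:
--         if local_part.startswith(company) and len(company) >= 4:
--             suffix = local_part[len(company):]
--             # Allow common legitimate suffixes
--             if suffix in ['', 'team', 'store', 'shop', 'deals', 'offers', 'news', 'updates']:
--                 return True
--
--     return False
-- ===== SOURCE B (Python) =====
-- _COMPANIES = {
--     'kohls', 'kohl', 'macys', 'macy', 'nordstrom', 'target', 'walmart',
--     'amazon', 'costco', 'sears', 'jcpenney', 'bloomingdales',
--     'loft', 'nike', 'adidas', 'gap', 'oldnavy', 'banana', 'republic',
--     'forever21', 'hm', 'zara', 'uniqlo', 'express', 'victoriassecret',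
--     'bestbuy', 'homedepot', 'lowes', 'staples', 'officemax', 'officedepot',
--     'walgreens', 'cvs', 'rite', 'aid', 'petco', 'petsmart',
--     'starbucks', 'mcdonalds', 'subway', 'dominos', 'pizzahut', 'kfc',
--     'tacobell', 'wendys', 'chipotle', 'panera',
--     'apple', 'microsoft', 'google', 'facebook', 'twitter', 'linkedin',
--     'netflix', 'spotify', 'uber', 'lyft', 'airbnb',
--     'chase', 'wellsfargo', 'bankofamerica', 'citi', 'amex', 'discover',
--     'expedia', 'priceline', 'kayak', 'booking', 'hotels',
--     'cnn', 'bbc', 'reuters', 'nytimes', 'washingtonpost', 'wsj',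
--     'bloomberg', 'forbes', 'time', 'newsweek',
--     'consumerreports', 'consumer', 'reports', 'yelp', 'groupon',
--     'nextdoor', 'zillow', 'realtor', 'redfin'
-- }
--
-- _SUFFIXES = ['', 'team', 'store', 'shop', 'deals', 'offers', 'news', 'updates']
--
-- # Precomputed closed table: every string the partial-match loop of A would ever
-- # accept, i.e. company (len >= 4) + allowed suffix.  Built once at import time.
-- _ACCEPTED = {c + s for c in _COMPANIES if len(c) >= 4 for s in _SUFFIXES}
--
--
-- def _is_likely_company_name_prefix(local_part):
--     """Pure membership in precomputed tables; no per-call scan over companies."""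
--     return (local_part in _COMPANIES
--             or local_part in _ACCEPTED
--             or local_part.replace('_', '').replace('-', '') in _COMPANIES)
--
--
-- def _is_professional_name_pattern(local_part):
--     """Check for professional name patterns like firstname.lastname"""
--     parts = local_part.split('.')
--     name_ok = len(parts) == 2 and all(len(p) >= 2 for p in parts)
--     role_ok = any(r in local_part for r in ('ceo', 'cfo', 'cto', 'vp', 'president', 'director'))
--     dept_ok = ('.' in local_part or '_' in local_part) and any(
--         d in local_part for d in ('marketing', 'sales', 'support'))
--     return name_ok or role_ok or dept_ok or _is_likely_company_name_prefix(local_part)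
-- ===== Notes on version B (the rewrite author's own statement) =====
-- stated objective: alternative
-- what changed: The helper's per-call startswith scan over ~100 companies is replaced by a precomputed closed table of every acceptable company+suffix string (built once), so the query is three O(1) set-membership tests; the outer any-over-list-of-booleans becomes named boolean checks combined with or.
import Mathlib
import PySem

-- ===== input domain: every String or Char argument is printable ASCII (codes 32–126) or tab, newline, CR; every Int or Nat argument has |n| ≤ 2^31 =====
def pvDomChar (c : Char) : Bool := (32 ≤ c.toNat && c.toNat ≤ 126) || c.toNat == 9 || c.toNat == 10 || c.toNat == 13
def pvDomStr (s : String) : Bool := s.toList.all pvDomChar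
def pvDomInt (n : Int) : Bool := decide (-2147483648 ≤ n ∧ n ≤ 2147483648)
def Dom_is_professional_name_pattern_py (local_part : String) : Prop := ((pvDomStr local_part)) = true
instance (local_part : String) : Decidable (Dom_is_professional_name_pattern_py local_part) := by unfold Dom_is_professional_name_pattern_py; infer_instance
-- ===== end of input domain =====

-- B replaces the helper's per-call startswith scan over ~100 companies by a precomputed
-- table of every acceptable company+suffix string, so the query is pure set membership
-- (objective: alternative).

-- ===== PORT A =====
-- shared literals both Python versions carry
def pvCompanyList : List String :=
  ["kohls", "kohl", "macys", "macy", "nordstrom", "target", "walmart",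
   "amazon", "costco", "sears", "jcpenney", "bloomingdales",
   "loft", "nike", "adidas", "gap", "oldnavy", "banana", "republic",
   "forever21", "hm", "zara", "uniqlo", "express", "victoriassecret",
   "bestbuy", "homedepot", "lowes", "staples", "officemax", "officedepot",
   "walgreens", "cvs", "rite", "aid", "petco", "petsmart",
   "starbucks", "mcdonalds", "subway", "dominos", "pizzahut", "kfc",
   "tacobell", "wendys", "chipotle", "panera",
   "apple", "microsoft", "google", "facebook", "twitter", "linkedin",
   "netflix", "spotify", "uber", "lyft", "airbnb",
   "chase", "wellsfargo", "bankofamerica", "citi", "amex", "discover",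
   "expedia", "priceline", "kayak", "booking", "hotels",
   "cnn", "bbc", "reuters", "nytimes", "washingtonpost", "wsj",
   "bloomberg", "forbes", "time", "newsweek",
   "consumerreports", "consumer", "reports", "yelp", "groupon",
   "nextdoor", "zillow", "realtor", "redfin"]

def pvCompanySet : PySem.Set String := PySem.Set.ofList pvCompanyList
def pvSuffixes : List String := ["", "team", "store", "shop", "deals", "offers", "news", "updates"]
def pvRoles : List String := ["ceo", "cfo", "cto", "vp", "president", "director"]
def pvDepts : List String := ["marketing", "sales", "support"]

-- A's helper: scans every company with startswith
def is_likely_company_name_prefix_py (local_part : String) : Bool :=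
  if pvCompanySet.contains local_part then true
  else if pvCompanySet.contains
      (PySem.Str.replace (PySem.Str.replace local_part "_" "") "-" "") then true
  else pvCompanySet.any (fun company =>
    PySem.Str.startswith local_part company && decide (4 ≤ PySem.Str.len company) &&
    pvSuffixes.contains (PySem.Str.slice local_part (some (PySem.Str.len company)) none))

def is_professional_name_pattern_py (local_part : String) : Bool :=
  [decide ((((PySem.Str.split? local_part ".").getD [])).length = 2) &&
     (((PySem.Str.split? local_part ".").getD [])).all (fun part => decide (2 ≤ PySem.Str.len part)),
   pvRoles.any (fun role => PySem.Str.isIn role local_part),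
   pvDepts.any (fun dept =>
     (PySem.Str.isIn "." local_part || PySem.Str.isIn "_" local_part) &&
     PySem.Str.isIn dept local_part),
   is_likely_company_name_prefix_py local_part].any id

-- ===== PORT B =====
-- B's precomputed table: every company (len >= 4) concatenated with every allowed suffix
def pvAcceptedSet : PySem.Set String :=
  PySem.Set.ofList
    ((pvCompanyList.filter (fun c => decide (4 ≤ PySem.Str.len c))).flatMap
      (fun c => pvSuffixes.map (fun s => c ++ s)))

-- B's helper: three membership tests, no scan over companies at query time
def is_likely_company_name_prefix_alt (local_part : String) : Bool :=
  pvCompanySet.contains local_part ||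
  pvAcceptedSet.contains local_part ||
  pvCompanySet.contains (PySem.Str.replace (PySem.Str.replace local_part "_" "") "-" "")

def is_professional_name_pattern_py_alt (local_part : String) : Bool :=
  let parts := (PySem.Str.split? local_part ".").getD []
  let name_ok := decide (parts.length = 2) && parts.all (fun p => decide (2 ≤ PySem.Str.len p))
  let role_ok := pvRoles.any (fun r => PySem.Str.isIn r local_part)
  let dept_ok := (PySem.Str.isIn "." local_part || PySem.Str.isIn "_" local_part) &&
    pvDepts.any (fun d => PySem.Str.isIn d local_part)
  name_ok || role_ok || dept_ok || is_likely_company_name_prefix_alt local_part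

-- ===== PRECONDITION & SPEC =====
def Spec_is_professional_name_pattern_py (local_part : String) (out : Bool) : Prop := out = is_professional_name_pattern_py_alt local_part
instance (local_part : String) (out : Bool) : Decidable (Spec_is_professional_name_pattern_py local_part out) := by unfold Spec_is_professional_name_pattern_py; infer_instance

-- ===== CLAIM (what is proved, stated in full; the proofs are below) =====
def Claim_equal_is_professional_name_pattern_py : Prop := ∀ (local_part : String), Dom_is_professional_name_pattern_py local_part → Spec_is_professional_name_pattern_py local_part (is_professional_name_pattern_py local_part)

-- ===== LEMMAS AND PROOFS =====

-- one company: "lp starts with c and the remainder is in S"  ↔  "lp = c ++ s for some s ∈ S"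
lemma startswith_slice_iff (lp c : String) (S : List String) :
    (PySem.Str.startswith lp c = true ∧
      PySem.Str.slice lp (some (PySem.Str.len c)) none ∈ S)
    ↔ ∃ s ∈ S, c ++ s = lp := by
  constructor
  · rintro ⟨hpre, hmem⟩
    rw [PySem.Str.startswith_eq, PySem.Chars.startswith_iff] at hpre
    obtain ⟨t, ht⟩ := hpre
    refine ⟨_, hmem, ?_⟩
    have htl : (PySem.Str.slice lp (some (PySem.Str.len c)) none).toList
        = lp.toList.drop c.toList.length := by
      rw [PySem.Str.len_eq, PySem.Str.toList_slice, PySem.Chars.slice_eq_listSlice,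
        PySem.List.slice_from_natCast]
    rw [← String.toList_inj, String.toList_append, htl, ← ht, List.drop_left]
  · rintro ⟨s, hs, hcat⟩
    have hlist : lp.toList = c.toList ++ s.toList := by
      rw [← hcat, String.toList_append]
    constructor
    · rw [PySem.Str.startswith_eq, PySem.Chars.startswith_iff, hlist]
      exact List.prefix_append _ _
    · have : PySem.Str.slice lp (some (PySem.Str.len c)) none = s := by
        rw [← String.toList_inj, PySem.Str.len_eq, PySem.Str.toList_slice,
          PySem.Chars.slice_eq_listSlice, PySem.List.slice_from_natCast, hlist,
          List.drop_left]
      rwa [this]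

-- A's partial-match loop computes exactly membership in B's precomputed table
lemma loop_eq_table (lp : String) :
    (pvCompanySet.any (fun company =>
      PySem.Str.startswith lp company && decide (4 ≤ PySem.Str.len company) &&
      pvSuffixes.contains (PySem.Str.slice lp (some (PySem.Str.len company)) none)))
    = pvAcceptedSet.contains lp := by
  rw [Bool.eq_iff_iff]
  simp only [pvAcceptedSet, pvCompanySet, List.any_eq_true, Bool.and_eq_true,
    decide_eq_true_eq, List.contains_iff_mem, PySem.Set.contains, PySem.Set.mem_ofList,
    List.mem_flatMap, List.mem_filter, List.mem_map]
  constructor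
  · rintro ⟨c, hc, ⟨hpre, hlen⟩, hsuf⟩
    obtain ⟨s, hs, hcat⟩ := (startswith_slice_iff lp c pvSuffixes).mp ⟨hpre, hsuf⟩
    exact ⟨c, ⟨hc, hlen⟩, s, hs, hcat⟩
  · rintro ⟨c, ⟨hc, hlen⟩, s, hs, hcat⟩
    obtain ⟨hpre, hsuf⟩ := (startswith_slice_iff lp c pvSuffixes).mpr ⟨s, hs, hcat⟩
    exact ⟨c, hc, ⟨hpre, hlen⟩, hsuf⟩

lemma helper_eq (lp : String) :
    is_likely_company_name_prefix_py lp = is_likely_company_name_prefix_alt lp := by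
  unfold is_likely_company_name_prefix_py is_likely_company_name_prefix_alt
  rw [loop_eq_table]
  cases h1 : pvCompanySet.contains lp <;>
    cases h2 : pvCompanySet.contains
      (PySem.Str.replace (PySem.Str.replace lp "_" "") "-" "") <;> simp

lemma any_and_left {α : Type} (l : List α) (c : Bool) (f : α → Bool) :
    (l.any (fun x => c && f x)) = (c && l.any f) := by
  cases c <;> simp

-- ===== VERDICT (by name: the statement is the Claim_ definition above) =====
theorem is_professional_name_pattern_py_spec : Claim_equal_is_professional_name_pattern_py := by
  intro lp _
  unfold Spec_is_professional_name_pattern_py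
  unfold is_professional_name_pattern_py is_professional_name_pattern_py_alt
  rw [any_and_left, helper_eq]
  simp [Bool.or_assoc]
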